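-- pv_equiv track=rewrite | github.com/StudioWEngineers/py-sofistik-utils | src/py_sofistik_utils/dat_manipulator/manipulator.py | _count_chapters
-- ===== SOURCE A (Python) =====
-- def _count_chapters(content: list[str]) -> list[tuple[int, int]] | None:
--     """Return a list of tuples each one containing the start and end line of a
--     chapter. If no chapters have been defined, return `None`.
--     """
--     indexes: list[int] = []
--     there_is_chapter = False
--     for line_index, line in enumerate(content):
--         if line.lstrip()[3:10] == "CHAPTER":
--             indexes.append(line_index)
--             if there_is_chapter:
--                 indexes.append(line_index - 1)
--             there_is_chapter = True
--
--     if there_is_chapter: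
--         indexes.append(len(content))
--         indexes.sort()
--         return [(indexes[_], indexes[_ + 1]) for _ in range(0, len(indexes), 2)]
--
--     return None
-- ===== SOURCE B (Python) =====
-- def _count_chapters(content: list[str]) -> list[tuple[int, int]] | None:
--     """Same result as A: one pass collects chapter start indices; ranges are
--     then built directly by pairing consecutive starts (no interleaving, no sort)."""
--     starts = [i for i, line in enumerate(content) if line.lstrip()[3:10] == "CHAPTER"]
--     if not starts:
--         return None
--     return [(s, e - 1) for s, e in zip(starts, starts[1:])] + [(starts[-1], len(content))]
-- ===== Notes on version B (the rewrite author's own statement) =====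
-- stated objective: simpler
-- what changed: B collects only the chapter start indices in one comprehension and builds the ranges directly by pairing consecutive starts (end = next start - 1, last end = len(content)), removing A's interleaved end-appending, the boolean flag and the sort.
import Mathlib
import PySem

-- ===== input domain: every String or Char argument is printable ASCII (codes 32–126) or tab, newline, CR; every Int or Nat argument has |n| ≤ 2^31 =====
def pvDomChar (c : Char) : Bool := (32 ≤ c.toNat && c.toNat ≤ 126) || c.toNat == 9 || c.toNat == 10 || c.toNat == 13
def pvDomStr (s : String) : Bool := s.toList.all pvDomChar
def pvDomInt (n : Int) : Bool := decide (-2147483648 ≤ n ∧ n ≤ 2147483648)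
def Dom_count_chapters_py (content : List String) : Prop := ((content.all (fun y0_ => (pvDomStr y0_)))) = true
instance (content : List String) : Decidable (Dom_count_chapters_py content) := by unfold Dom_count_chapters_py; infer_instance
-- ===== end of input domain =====

-- B collects only the chapter start indices in one pass and pairs consecutive starts
-- directly, dropping A's interleaved end-appending, boolean flag and sort (objective: simpler).

-- line.lstrip()[3:10] == "CHAPTER"  (shared chapter-line test of both Pythons)
def pvChk (line : String) : Bool :=
  PySem.Str.slice (PySem.Str.lstrip line) (some 3) (some 10) == "CHAPTER"

-- loop body of A, named so the proofs can step through it: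
-- indexes.append(line_index); if there_is_chapter: indexes.append(line_index - 1); flag := True
def pvStepA (st : List Int × Bool) (p : Int × String) : List Int × Bool :=
  if pvChk p.2 then (st.1 ++ [p.1] ++ (if st.2 then [p.1 - 1] else []), true) else st

-- ===== PORT A =====
def count_chapters_py (content : List String) : Option (List (Int × Int)) :=
  let st := (PySem.List.enumerate content).foldl pvStepA ([], false)
  if st.2 then
    let indexes := PySem.List.sorted (st.1 ++ [(content.length : Int)]) (fun x => x) false
    -- indexes[_] / indexes[_+1]: indexes always has even length, so both lookups are in
    -- range on every input and the default 0 is never used — exact for the Python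
    some ((PySem.List.pyRange 0 (indexes.length : Int) 2).map
      (fun i => (PySem.List.pyGetD indexes i 0, PySem.List.pyGetD indexes (i + 1) 0)))
  else none

-- ===== PORT B =====
def count_chapters_py_alt (content : List String) : Option (List (Int × Int)) :=
  let starts := (PySem.List.enumerate content).foldl
    (fun (acc : List Int) (p : Int × String) => if pvChk p.2 then acc ++ [p.1] else acc) []
  if starts.isEmpty then none
  else
    -- [(s, e - 1) for s, e in zip(starts, starts[1:])] + [(starts[-1], len(content))]
    -- starts is nonempty here, so the default 0 of starts[-1] is never used — exact
    some ((starts.zip (PySem.List.slice starts (some 1) none)).map (fun p => (p.1, p.2 - 1))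
      ++ [(PySem.List.pyGetD starts (-1) 0, (content.length : Int))])

-- ===== PRECONDITION & SPEC =====
def Spec_count_chapters_py (content : List String) (out : Option (List (Int × Int))) : Prop := out = count_chapters_py_alt content
instance (content : List String) (out : Option (List (Int × Int))) : Decidable (Spec_count_chapters_py content out) := by unfold Spec_count_chapters_py; infer_instance

-- ===== CLAIM (what is proved, stated in full; the proofs are below) =====
def Claim_equal_count_chapters_py : Prop := ∀ (content : List String), Dom_count_chapters_py content → Spec_count_chapters_py content (count_chapters_py content)

-- ===== LEMMAS AND PROOFS =====

-- A's interleaved index list: after the first start s, each later start t contributes [t, t-1]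
def pvFlat2 (ss : List Int) : List Int := ss.flatMap (fun t => [t, t - 1])

-- the sorted shape of A's index list: s, t₁-1, t₁, t₂-1, t₂, …, n
def pvD : Int → List Int → Int → List Int
  | s, [], n => [s, n]
  | s, t :: r, n => s :: (t - 1) :: pvD t r n

-- pairing an even-length list into consecutive pairs
def pvPairs : List Int → List (Int × Int)
  | a :: b :: r => (a, b) :: pvPairs r
  | _ => []

theorem pv_foldA_true (l : List (Int × String)) : ∀ (idx : List Int),
    l.foldl pvStepA (idx, true)
    = (idx ++ pvFlat2 ((l.filter (fun p => pvChk p.2)).map (fun p => p.1)), true) := by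
  induction l with
  | nil => intro idx; simp [pvFlat2]
  | cons p l ih =>
    intro idx
    rw [List.foldl_cons]
    by_cases h : pvChk p.2
    · have hstep : pvStepA (idx, true) p = (idx ++ [p.1, p.1 - 1], true) := by
        simp [pvStepA, h]
      rw [hstep, ih]
      simp [pvFlat2, h, List.append_assoc]
    · have hstep : pvStepA (idx, true) p = (idx, true) := by simp [pvStepA, h]
      rw [hstep, ih]
      simp [h]

theorem pv_foldA_false (l : List (Int × String)) : ∀ (idx : List Int),
    l.foldl pvStepA (idx, false)
    = (match (l.filter (fun p => pvChk p.2)).map (fun p => p.1) with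
       | [] => (idx, false)
       | s :: rest => (idx ++ s :: pvFlat2 rest, true)) := by
  induction l with
  | nil => intro idx; simp
  | cons p l ih =>
    intro idx
    rw [List.foldl_cons]
    by_cases h : pvChk p.2
    · have hstep : pvStepA (idx, false) p = (idx ++ [p.1], true) := by simp [pvStepA, h]
      rw [hstep, pv_foldA_true]
      simp [h, List.append_assoc]
    · have hstep : pvStepA (idx, false) p = (idx, false) := by simp [pvStepA, h]
      rw [hstep, ih]
      simp [h]

theorem pv_perm_D (n : Int) : ∀ (rest : List Int) (s : Int),
    (pvD s rest n).Perm ((s :: pvFlat2 rest) ++ [n]) := by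
  intro rest
  induction rest with
  | nil => intro s; simp [pvD, pvFlat2]
  | cons t r ih =>
    intro s
    have h1 : ((t - 1) :: pvD t r n).Perm ((t - 1) :: (t :: pvFlat2 r ++ [n])) :=
      (ih t).cons (t - 1)
    have h2 : ((t - 1) :: (t :: pvFlat2 r ++ [n])).Perm (t :: (t - 1) :: (pvFlat2 r ++ [n])) :=
      List.Perm.swap _ _ _
    have := (h1.trans h2).cons s
    simpa [pvD, pvFlat2, List.append_assoc] using this

theorem pv_mem_D_ge (n : Int) : ∀ (rest : List Int) (s x : Int),
    List.Pairwise (· < ·) (s :: rest) → (∀ y ∈ s :: rest, y < n) → x ∈ pvD s rest n → s ≤ x := by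
  intro rest
  induction rest with
  | nil =>
    intro s x _ hlt hx
    simp [pvD] at hx
    rcases hx with rfl | rfl
    · exact le_refl _
    · exact le_of_lt (hlt s (by simp))
  | cons t r ih =>
    intro s x hch hlt hx
    rw [List.pairwise_cons] at hch
    have hst : s < t := hch.1 t (by simp)
    simp only [pvD, List.mem_cons] at hx
    rcases hx with rfl | rfl | hx
    · exact le_refl _
    · omega
    · have := ih t x hch.2 (fun y hy => hlt y (by simp at hy ⊢; tauto)) hx
      omega

theorem pv_pairwise_D (n : Int) : ∀ (rest : List Int) (s : Int),
    List.Pairwise (· < ·) (s :: rest) → (∀ y ∈ s :: rest, y < n) →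
    List.Pairwise (· ≤ ·) (pvD s rest n) := by
  intro rest
  induction rest with
  | nil =>
    intro s _ hlt
    simp [pvD]
    exact le_of_lt (hlt s (by simp))
  | cons t r ih =>
    intro s hch hlt
    rw [List.pairwise_cons] at hch
    have hst : s < t := hch.1 t (by simp)
    have hlt' : ∀ y ∈ t :: r, y < n := fun y hy => hlt y (by simp at hy ⊢; tauto)
    have hge := pv_mem_D_ge n r t
    simp only [pvD, List.pairwise_cons]
    refine ⟨?_, ?_, ih t hch.2 hlt'⟩
    · intro x hx
      simp only [List.mem_cons] at hx
      rcases hx with rfl | hx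
      · omega
      · have := hge x hch.2 hlt' hx; omega
    · intro x hx
      have := hge x hch.2 hlt' hx; omega

theorem pv_len_D (n : Int) : ∀ (rest : List Int) (s : Int),
    (pvD s rest n).length = 2 * rest.length + 2 := by
  intro rest
  induction rest with
  | nil => intro s; simp [pvD]
  | cons t r ih => intro s; simp [pvD, ih t]; omega

theorem pv_getD_pairs (m : Nat) : ∀ (l : List Int), l.length = 2 * m →
    (List.range m).map (fun k => (l.getD (2 * k) 0, l.getD (2 * k + 1) 0)) = pvPairs l := by
  induction m with
  | zero =>
    intro l hl
    have : l = [] := List.eq_nil_of_length_eq_zero (by omega)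
    simp [this, pvPairs]
  | succ m ih =>
    intro l hl
    match l with
    | a :: b :: r =>
      have hr : r.length = 2 * m := by simp at hl; omega
      rw [List.range_succ_eq_map]
      simp only [List.map_cons, List.map_map]
      have h0 : ((a :: b :: r).getD (2 * 0) 0, (a :: b :: r).getD (2 * 0 + 1) 0) = (a, b) := by
        simp
      rw [h0]
      have hstep : (List.range m).map
          ((fun k => ((a :: b :: r).getD (2 * k) 0, (a :: b :: r).getD (2 * k + 1) 0)) ∘ (· + 1))
          = (List.range m).map (fun k => (r.getD (2 * k) 0, r.getD (2 * k + 1) 0)) := by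
        apply List.map_congr_left
        intro k _
        simp only [Function.comp]
        have e1 : 2 * (k + 1) = 2 * k + 1 + 1 := by omega
        rw [e1]
        simp [List.getD_cons_succ]
      rw [hstep, ih r hr, pvPairs]

theorem pv_range_pairs (l : List Int) (m : Nat) (hl : l.length = 2 * m) :
    (PySem.List.pyRange 0 (l.length : Int) 2).map
      (fun i => (PySem.List.pyGetD l i 0, PySem.List.pyGetD l (i + 1) 0)) = pvPairs l := by
  rw [PySem.List.pyRange_of_pos 0 (l.length : Int) (by norm_num)]
  rw [List.map_map]
  have hcount : (if (0 : Int) < (l.length : Int)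
      then (((l.length : Int) - 0 + 2 - 1) / 2).toNat else 0) = m := by
    rw [hl]
    split_ifs with h
    · have e : ((2 * m : Nat) : Int) - 0 + 2 - 1 = 2 * (m : Int) + 1 := by push_cast; ring
      rw [e]
      omega
    · push_cast at h
      omega
  rw [hcount]
  rw [← pv_getD_pairs m l hl]
  apply List.map_congr_left
  intro k _
  simp only [Function.comp]
  have e1 : (0 : Int) + 2 * (k : Int) = ((2 * k : Nat) : Int) := by push_cast; ring
  rw [e1]
  have e2 : ((2 * k : Nat) : Int) + 1 = ((2 * k + 1 : Nat) : Int) := by push_cast; ring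
  rw [e2, PySem.List.pyGetD_natCast, PySem.List.pyGetD_natCast]

theorem pv_pairs_D (n : Int) : ∀ (rest : List Int) (s : Int),
    pvPairs (pvD s rest n)
      = ((s :: rest).zip rest).map (fun p => (p.1, p.2 - 1)) ++ [((s :: rest).getLastD 0, n)] := by
  intro rest
  induction rest with
  | nil => intro s; simp [pvD, pvPairs]
  | cons t r ih =>
    intro s
    simp only [pvD, pvPairs, ih t, List.zip_cons_cons, List.map_cons]
    simp [List.getLastD]

-- Claim_equal, assembled from the lemmas above
theorem count_chapters_py_eq_alt (content : List String) :
    count_chapters_py content = count_chapters_py_alt content := by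
  simp only [count_chapters_py, count_chapters_py_alt]
  rw [PySem.List.foldl_append_if (fun p : Int × String => pvChk p.2) (fun p => p.1)]
  rw [pv_foldA_false]
  simp only [List.nil_append]
  rcases hss : ((PySem.List.enumerate content).filter (fun p => pvChk p.2)).map
      (fun p => p.1) with _ | ⟨s, rest⟩
  · rw [hss]
    simp
  · rw [hss]
    simp only [List.isEmpty_cons, if_false, Bool.false_eq_true]
    -- order facts about the start indices
    have hpw : List.Pairwise (· < ·) (s :: rest) := by
      rw [← hss]
      rw [List.pairwise_map]
      exact (PySem.List.pairwise_lt_enumerate content 0).sublist List.filter_sublist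
    have hlt : ∀ y ∈ s :: rest, y < (content.length : Int) := by
      intro y hy
      rw [← hss] at hy
      simp only [List.mem_map, List.mem_filter] at hy
      obtain ⟨p, ⟨hpmem, _⟩, rfl⟩ := hy
      rw [PySem.List.mem_enumerate_iff] at hpmem
      obtain ⟨k, hk, rfl⟩ := hpmem
      simp
      omega
    have hsorted : PySem.List.sorted ((s :: pvFlat2 rest) ++ [(content.length : Int)])
        (fun x => x) false = pvD s rest (content.length : Int) :=
      PySem.List.sorted_id_eq_of_perm_of_pairwise _ _
        (pv_perm_D (content.length : Int) rest s)
        (pv_pairwise_D (content.length : Int) rest s hpw hlt)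
    rw [hsorted]
    rw [pv_range_pairs _ (rest.length + 1) (by rw [pv_len_D]; omega)]
    rw [pv_pairs_D]
    have htail : PySem.List.slice (s :: rest) (some 1) none = rest := by
      rw [PySem.List.slice_from_one]; rfl
    rw [htail]
    have hlast : PySem.List.pyGetD (s :: rest) (-1) 0 = (s :: rest).getLastD 0 := by
      rw [PySem.List.pyGetD_neg_one _ _ (by simp)]
      simp [List.getLastD_eq_getLast?, List.getLast?_eq_some_getLast]
    rw [hlast]
    simp

-- ===== VERDICT (by name: the statement is the Claim_ definition above) =====
theorem count_chapters_py_spec : Claim_equal_count_chapters_py := by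
  intro content _
  exact count_chapters_py_eq_alt content
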